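-- pv_equiv track=rewrite | github.com/Sendil239/lens | lens_backend/solr_search.py | getPoiTweetCount
-- ===== SOURCE A (Python) =====
-- def getPoiTweetCount(payload, tweet_list, poi_set):
--
--     temp_poi_set = set()
--     if len(payload['poi_names']) > 0:
--         for poi in payload['poi_names']:
--             temp_poi_set.add(poi)
--     else:
--         temp_poi_set = poi_set.copy()
--     poi_tweet_count = {}
--     for poi in temp_poi_set:
--         poi_tweet_count[poi] = 0
--
--     for tweet in tweet_list:
--         poi_name = tweet['poi_name']
--         if poi_name in temp_poi_set:
--             poi_tweet_count[poi_name] += 1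
--
--     return poi_tweet_count
-- ===== SOURCE B (Python) =====
-- def getPoiTweetCount(payload, tweet_list, poi_set):
--     poi_names = payload['poi_names']
--     temp_poi_set = set(poi_names) if poi_names else set(poi_set)
--     names = [tweet['poi_name'] for tweet in tweet_list]
--     return {poi: names.count(poi) for poi in temp_poi_set}
-- ===== Notes on version B (the rewrite author's own statement) =====
-- stated objective: simpler
-- what changed: B keeps no counting dictionary at all: it extracts the list of tweet POI names once and builds the result as a per-POI projection {poi: names.count(poi)}, replacing A's zero-initialization loop plus membership-guarded increment loop with two list passes and list.count.
import Mathlib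
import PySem

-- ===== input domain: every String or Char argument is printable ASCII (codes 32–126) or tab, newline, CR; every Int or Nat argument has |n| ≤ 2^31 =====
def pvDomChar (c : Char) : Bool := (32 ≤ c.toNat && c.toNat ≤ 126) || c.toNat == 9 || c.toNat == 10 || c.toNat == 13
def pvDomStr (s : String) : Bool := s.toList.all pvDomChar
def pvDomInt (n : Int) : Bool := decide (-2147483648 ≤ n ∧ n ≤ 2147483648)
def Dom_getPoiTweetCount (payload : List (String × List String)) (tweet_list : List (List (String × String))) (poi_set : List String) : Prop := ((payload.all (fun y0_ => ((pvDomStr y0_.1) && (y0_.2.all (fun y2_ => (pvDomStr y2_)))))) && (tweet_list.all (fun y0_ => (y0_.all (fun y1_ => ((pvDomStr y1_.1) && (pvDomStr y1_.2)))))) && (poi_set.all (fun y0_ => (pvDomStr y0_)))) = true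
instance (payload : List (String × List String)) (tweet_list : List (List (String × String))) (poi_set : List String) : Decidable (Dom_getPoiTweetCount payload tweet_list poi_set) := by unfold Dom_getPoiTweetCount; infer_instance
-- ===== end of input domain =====

-- B keeps no counting dictionary: it lists the tweets' POI names once and projects the POI set
-- with list.count (simpler decomposition); A zero-initializes a dict and increments under a guard.

-- ===== PORT A =====
def getPoiTweetCount (payload : List (String × List String)) (tweet_list : List (List (String × String))) (poi_set : List String) : List (String × Int) :=
  -- payload['poi_names'] (KeyError excluded by Pre_; default [] is never used under Pre_)
  let poi_names := (PySem.Dict.mk payload).getD "poi_names" []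
  let temp_poi_set : PySem.Set String :=
    if poi_names.length > 0 then
      poi_names.foldl (fun s poi => PySem.Set.add s poi) PySem.Set.empty
    else
      PySem.Set.ofList poi_set       -- poi_set.copy() of the Python set
  let d0 : PySem.Dict String Int :=
    temp_poi_set.foldl (fun d poi => d.insert poi 0) PySem.Dict.empty
  let dfin : PySem.Dict String Int :=
    tweet_list.foldl (fun d tweet =>
      let poi_name := (PySem.Dict.mk tweet).getD "poi_name" ""
      if poi_name ∈ temp_poi_set then d.modify poi_name 0 (· + 1) else d) d0
  dfin.items

-- ===== PORT B =====
def getPoiTweetCount_alt (payload : List (String × List String)) (tweet_list : List (List (String × String))) (poi_set : List String) : List (String × Int) :=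
  let poi_names := (PySem.Dict.mk payload).getD "poi_names" []
  let temp_poi_set : PySem.Set String :=
    if poi_names ≠ [] then PySem.Set.ofList poi_names else PySem.Set.ofList poi_set
  let names : List String := tweet_list.map (fun tweet => (PySem.Dict.mk tweet).getD "poi_name" "")
  temp_poi_set.map (fun poi => (poi, (PySem.List.count names poi : Int)))

-- ===== PRECONDITION & SPEC =====
-- Pre_ excludes exactly the inputs where the Python raises KeyError: payload without a
-- 'poi_names' key, or some tweet without a 'poi_name' key.
def Pre_getPoiTweetCount (payload : List (String × List String)) (tweet_list : List (List (String × String))) (poi_set : List String) : Prop :=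
  (PySem.Dict.mk payload).contains "poi_names" = true ∧
  ∀ tweet ∈ tweet_list, (PySem.Dict.mk tweet).contains "poi_name" = true
instance (payload : List (String × List String)) (tweet_list : List (List (String × String))) (poi_set : List String) : Decidable (Pre_getPoiTweetCount payload tweet_list poi_set) := by unfold Pre_getPoiTweetCount; infer_instance

def pvWitness_getPoiTweetCount : (List (String × List String)) × (List (List (String × String))) × List String :=
  ([("poi_names", ["a", "b"])], [[("poi_name", "a")], [("poi_name", "c")], [("poi_name", "a")]], ["z"])

def Spec_getPoiTweetCount (payload : List (String × List String)) (tweet_list : List (List (String × String))) (poi_set : List String) (out : List (String × Int)) : Prop := out = getPoiTweetCount_alt payload tweet_list poi_set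
instance (payload : List (String × List String)) (tweet_list : List (List (String × String))) (poi_set : List String) (out : List (String × Int)) : Decidable (Spec_getPoiTweetCount payload tweet_list poi_set out) := by unfold Spec_getPoiTweetCount; infer_instance

-- ===== CLAIM (what is proved, stated in full; the proofs are below) =====
def Claim_equal_getPoiTweetCount : Prop := ∀ (payload : List (String × List String)) (tweet_list : List (List (String × String))) (poi_set : List String), Dom_getPoiTweetCount payload tweet_list poi_set → Pre_getPoiTweetCount payload tweet_list poi_set → Spec_getPoiTweetCount payload tweet_list poi_set (getPoiTweetCount payload tweet_list poi_set)

-- ===== LEMMAS AND PROOFS =====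

-- the name extracted from a tweet
def pvName (tweet : List (String × String)) : String := (PySem.Dict.mk tweet).getD "poi_name" ""

-- keys are preserved by A's counting loop
lemma keys_fold_A (temp : PySem.Set String) :
    ∀ (ts : List (List (String × String))) (d : PySem.Dict String Int), d.keys = temp →
      (ts.foldl (fun d tweet =>
        if pvName tweet ∈ temp then d.modify (pvName tweet) 0 (· + 1) else d) d).keys = temp := by
  intro ts
  induction ts with
  | nil => intro d h; simpa using h
  | cons t ts ih =>
    intro d h
    simp only [List.foldl_cons]
    by_cases hm : pvName t ∈ temp
    · simp only [hm, if_true]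
      apply ih
      rw [PySem.Dict.keys_modify, PySem.Dict.keys_insert_of_contains]
      · exact h
      · rw [PySem.Dict.contains_iff_mem_keys, h]; exact hm
    · simp only [hm, if_false]; exact ih d h

-- the value of A's counting loop at a key of temp
lemma getD_fold_A (temp : PySem.Set String) :
    ∀ (ts : List (List (String × String))) (d : PySem.Dict String Int) (p : String), p ∈ temp →
      (ts.foldl (fun d tweet =>
        if pvName tweet ∈ temp then d.modify (pvName tweet) 0 (· + 1) else d) d).getD p 0 =
      d.getD p 0 + ((ts.map pvName).count p : Int) := by
  intro ts
  induction ts with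
  | nil => intro d p _; simp
  | cons t ts ih =>
    intro d p hp
    simp only [List.foldl_cons, List.map_cons]
    by_cases hm : pvName t ∈ temp
    · simp only [hm, if_true]
      rw [ih _ p hp, PySem.Dict.getD_modify]
      by_cases he : p = pvName t
      · subst he; simp; ring
      · simp [he, Ne.symm he]
    · have he : p ≠ pvName t := fun h => hm (h ▸ hp)
      simp only [hm, if_false]
      rw [ih _ p hp]
      simp [Ne.symm he]

-- A's zero-initialization produces exactly the map of zeros over temp
lemma d0_items (temp : PySem.Set String) (hnd : temp.Nodup) :
    (temp.foldl (fun d poi => d.insert poi (0 : Int)) PySem.Dict.empty).items =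
      temp.map (fun p => (p, (0 : Int))) := by
  have := PySem.Dict.items_foldl_insert_fresh (l := temp) (k := fun p => p)
    (v := fun _ => (0 : Int)) (d := PySem.Dict.empty)
    (by intro a _; simp [PySem.Dict.contains_empty]) (by simpa using hnd)
  simpa using this

-- A's whole computation, for a nodup temp set: the counts of the tweet-name list over temp
lemma main_eq (temp : PySem.Set String) (hnd : temp.Nodup)
    (tweet_list : List (List (String × String))) :
    (tweet_list.foldl (fun d tweet =>
        if pvName tweet ∈ temp then d.modify (pvName tweet) 0 (· + 1) else d)
      (temp.foldl (fun d poi => d.insert poi (0 : Int)) PySem.Dict.empty)).items =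
    temp.map (fun p => (p, ((tweet_list.map pvName).count p : Int))) := by
  set d0 := temp.foldl (fun d poi => d.insert poi (0 : Int)) PySem.Dict.empty with hd0
  have hkeys0 : d0.keys = temp := by
    rw [PySem.Dict.keys, d0_items temp hnd, List.map_map]; exact List.map_id temp
  have hkeys : (tweet_list.foldl (fun d tweet =>
      if pvName tweet ∈ temp then d.modify (pvName tweet) 0 (· + 1) else d) d0).keys = temp :=
    keys_fold_A temp tweet_list d0 hkeys0
  rw [PySem.Dict.items_eq_map_keys _ (by rw [hkeys]; exact hnd) 0, hkeys]
  apply List.map_congr_left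
  intro p hp
  have hz : d0.getD p 0 = 0 := by
    apply PySem.Dict.getD_of_mem_items (v := (0 : Int))
    · rw [d0_items temp hnd]; exact List.mem_map_of_mem hp
    · rw [hkeys0]; exact hnd
  rw [getD_fold_A temp tweet_list d0 p hp, hz, zero_add]

lemma both_eq (names poi_set : List String) (tweet_list : List (List (String × String))) :
    ((tweet_list.foldl (fun d tweet =>
        if pvName tweet ∈ (if names.length > 0 then
            names.foldl (fun s poi => PySem.Set.add s poi) PySem.Set.empty
          else PySem.Set.ofList poi_set) then d.modify (pvName tweet) 0 (· + 1) else d)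
      ((if names.length > 0 then
            names.foldl (fun s poi => PySem.Set.add s poi) PySem.Set.empty
          else PySem.Set.ofList poi_set).foldl (fun d poi => d.insert poi (0 : Int))
        PySem.Dict.empty)).items) =
    (if names ≠ [] then PySem.Set.ofList names else PySem.Set.ofList poi_set).map
      (fun poi => (poi, (PySem.List.count (tweet_list.map pvName) poi : Int))) := by
  have htemp : (if names.length > 0 then
      names.foldl (fun s poi => PySem.Set.add s poi) PySem.Set.empty
    else PySem.Set.ofList poi_set) =
      (if names ≠ [] then PySem.Set.ofList names else PySem.Set.ofList poi_set) := by
    cases names <;> simp [PySem.Set.ofList]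
  rw [htemp]
  set temp := if names ≠ [] then PySem.Set.ofList names else PySem.Set.ofList poi_set with ht
  have hnd : temp.Nodup := by
    rw [ht]; split <;> exact PySem.Set.nodup_ofList _
  rw [main_eq temp hnd tweet_list]
  apply List.map_congr_left
  intro p _
  rw [PySem.List.count_eq]

-- ===== VERDICT (by name: the statement is the Claim_ definition above) =====
theorem getPoiTweetCount_spec : Claim_equal_getPoiTweetCount := by
  intro payload tweet_list poi_set _ _
  show getPoiTweetCount payload tweet_list poi_set = getPoiTweetCount_alt payload tweet_list poi_set
  exact both_eq ((PySem.Dict.mk payload).getD "poi_names" []) poi_set tweet_list
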